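-- pv_equiv track=rewrite | github.com/SingSongScreamAlong/ProjectBlackBox | relay_agent/complete_telemetry.py | _get_flag_string
-- ===== SOURCE A (Python) =====
-- def _get_flag_string(flags):
--     """Convert flag int to string"""
--     if not flags:
--         return 'green'
--
--     flag_map = {
--         0x00000001: 'checkered',
--         0x00000002: 'white',
--         0x00000004: 'green',
--         0x00000008: 'yellow',
--         0x00000010: 'red',
--         0x00000020: 'blue',
--         0x00000040: 'debris',
--         0x00000080: 'crossed',
--         0x00000100: 'yellow_waving',
--         0x00000200: 'one_lap_to_green',
--         0x00000400: 'green_held',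
--         0x00000800: 'ten_to_go',
--         0x00001000: 'five_to_go',
--         0x00002000: 'random_waving',
--         0x00004000: 'caution',
--         0x00008000: 'caution_waving',
--         0x00010000: 'black',
--         0x00020000: 'disqualify',
--         0x00040000: 'repair',
--         0x00080000: 'furled',
--         0x00100000: 'end_of_session'
--     }
--
--     for flag_bit, flag_name in flag_map.items():
--         if flags & flag_bit:
--             return flag_name
--
--     return 'green'
-- ===== SOURCE B (Python) =====
-- def _get_flag_string(flags):
--     """Convert flag int to string"""
--     if not flags:
--         return 'green'
--
--     names = ('checkered', 'white', 'green', 'yellow', 'red', 'blue', 'debris',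
--              'crossed', 'yellow_waving', 'one_lap_to_green', 'green_held',
--              'ten_to_go', 'five_to_go', 'random_waving', 'caution',
--              'caution_waving', 'black', 'disqualify', 'repair', 'furled',
--              'end_of_session')
--
--     i = (flags & -flags).bit_length() - 1
--     return names[i] if i < len(names) else 'green'
-- ===== Notes on version B (the rewrite author's own statement) =====
-- stated objective: simpler
-- what changed: Replaces the dict and its first-match scan over the flag bits with a tuple of names indexed directly by the position of the lowest set bit, computed arithmetically via the bit-isolation trick flags & -flags and bit_length.
import Mathlib
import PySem

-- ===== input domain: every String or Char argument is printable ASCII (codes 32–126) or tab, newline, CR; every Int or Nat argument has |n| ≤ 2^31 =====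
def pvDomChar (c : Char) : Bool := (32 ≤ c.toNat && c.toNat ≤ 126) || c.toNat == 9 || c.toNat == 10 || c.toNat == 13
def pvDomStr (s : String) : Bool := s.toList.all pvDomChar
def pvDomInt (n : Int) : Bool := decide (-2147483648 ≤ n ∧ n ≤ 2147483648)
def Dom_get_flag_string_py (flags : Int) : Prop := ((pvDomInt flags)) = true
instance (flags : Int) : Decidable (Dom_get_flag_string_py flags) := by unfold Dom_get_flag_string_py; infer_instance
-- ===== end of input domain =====

-- B replaces A's dict plus first-match loop by indexing a tuple of names with the
-- lowest set bit's position, computed as (flags & -flags).bit_length() - 1 (objective: simpler).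

-- ===== PORT A =====
-- the 'for flag_bit, flag_name in flag_map.items(): if flags & flag_bit: return flag_name' loop
def flagLoopA (flags : Int) : List (Int × String) → String
  | [] => "green"
  | (flag_bit, flag_name) :: rest =>
      if PySem.Int.band flags flag_bit ≠ 0 then flag_name else flagLoopA flags rest

def get_flag_string_py (flags : Int) : String :=
  if flags = 0 then "green"
  else
    let flag_map : PySem.Dict Int String := PySem.Dict.ofList
      [(0x00000001, "checkered"), (0x00000002, "white"), (0x00000004, "green"),
       (0x00000008, "yellow"), (0x00000010, "red"), (0x00000020, "blue"),
       (0x00000040, "debris"), (0x00000080, "crossed"), (0x00000100, "yellow_waving"),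
       (0x00000200, "one_lap_to_green"), (0x00000400, "green_held"),
       (0x00000800, "ten_to_go"), (0x00001000, "five_to_go"),
       (0x00002000, "random_waving"), (0x00004000, "caution"),
       (0x00008000, "caution_waving"), (0x00010000, "black"),
       (0x00020000, "disqualify"), (0x00040000, "repair"), (0x00080000, "furled"),
       (0x00100000, "end_of_session")]
    flagLoopA flags flag_map.items

-- ===== PORT B =====
def flagNames : List String :=
  ["checkered", "white", "green", "yellow", "red", "blue", "debris",
   "crossed", "yellow_waving", "one_lap_to_green", "green_held",
   "ten_to_go", "five_to_go", "random_waving", "caution",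
   "caution_waving", "black", "disqualify", "repair", "furled",
   "end_of_session"]

def get_flag_string_py_alt (flags : Int) : String :=
  if flags = 0 then "green"
  else
    let i : Int := (PySem.Int.bitLength (PySem.Int.band flags (-flags)) : Int) - 1
    if i < (flagNames.length : Int) then (PySem.List.pyGet? flagNames i).getD "green"
    else "green"

-- ===== PRECONDITION & SPEC =====
def Spec_get_flag_string_py (flags : Int) (out : String) : Prop := out = get_flag_string_py_alt flags
instance (flags : Int) (out : String) : Decidable (Spec_get_flag_string_py flags out) := by unfold Spec_get_flag_string_py; infer_instance

-- ===== CLAIM (what is proved, stated in full; the proofs are below) =====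
def Claim_equal_get_flag_string_py : Prop := ∀ (flags : Int), Dom_get_flag_string_py flags → Spec_get_flag_string_py flags (get_flag_string_py flags)

-- ===== LEMMAS AND PROOFS =====

-- bits of 2^j * (2t+1): zero below j, equal to (2t+1)'s bits shifted from j upward
lemma pv_testBit_shift (j t k : Nat) :
    Nat.testBit (2 ^ j * (2 * t + 1)) k =
      if k < j then false else Nat.testBit (2 * t + 1) (k - j) := by
  have h := Nat.testBit_two_pow_mul_add (2 * t + 1) (i := j) (b := 0)
    (Nat.two_pow_pos j) k
  simpa using h

-- bits of 2^j * (2t+1) - 1 = 2^j * (2t) + (2^j - 1)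
lemma pv_testBit_pred (j t k : Nat) :
    Nat.testBit (2 ^ j * (2 * t + 1) - 1) k =
      if k < j then true else Nat.testBit (2 * t) (k - j) := by
  have hpow : 1 ≤ 2 ^ j := Nat.one_le_two_pow
  have hrw : 2 ^ j * (2 * t + 1) - 1 = 2 ^ j * (2 * t) + (2 ^ j - 1) := by
    have : 2 ^ j * (2 * t + 1) = 2 ^ j * (2 * t) + 2 ^ j := by ring
    omega
  rw [hrw, Nat.testBit_two_pow_mul_add (2 * t) (i := j) (by omega) k]
  rcases Nat.lt_or_ge k j with hk | hk
  · simp [hk, Nat.testBit_two_pow_sub_one]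
  · simp [Nat.not_lt.mpr hk]

lemma pv_odd_and_even (t i : Nat) :
    (Nat.testBit (2 * t + 1) i && Nat.testBit (2 * t) i) = Nat.testBit (2 * t) i := by
  cases i with
  | zero => simp [Nat.testBit_zero]
  | succ i =>
      rw [Nat.testBit_add_one, Nat.testBit_add_one]
      have h1 : (2 * t + 1) / 2 = t := by omega
      have h2 : 2 * t / 2 = t := by omega
      rw [h1, h2, Bool.and_self]

-- n &&& (n - 1) clears the lowest set bit
lemma pv_and_pred (j t : Nat) :
    (2 ^ j * (2 * t + 1)) &&& (2 ^ j * (2 * t + 1) - 1) = 2 ^ j * (2 * t) := by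
  apply Nat.eq_of_testBit_eq
  intro k
  rw [Nat.testBit_and, pv_testBit_shift, pv_testBit_pred]
  have hrhs : Nat.testBit (2 ^ j * (2 * t)) k =
      if k < j then false else Nat.testBit (2 * t) (k - j) := by
    cases t with
    | zero => simp
    | succ t' =>
        have h := Nat.testBit_two_pow_mul_add (2 * (t' + 1)) (i := j) (b := 0)
          (Nat.two_pow_pos j) k
        simpa using h
  rw [hrhs]
  rcases Nat.lt_or_ge k j with hk | hk
  · simp [hk]
  · simp only [Nat.not_lt.mpr hk, if_false]
    exact pv_odd_and_even t (k - j)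

-- low bits of n are zero below the lowest set bit, and set at it
lemma pv_and_two_pow_lt (j t k : Nat) (hk : k < j) :
    (2 ^ j * (2 * t + 1)) &&& 2 ^ k = 0 := by
  rw [Nat.and_two_pow, pv_testBit_shift]
  simp [hk]

lemma pv_and_two_pow_eq (j t : Nat) :
    (2 ^ j * (2 * t + 1)) &&& 2 ^ j = 2 ^ j := by
  rw [Nat.and_two_pow, pv_testBit_shift]
  simp [Nat.testBit_zero]

lemma pv_pred_and_two_pow (j t k : Nat) :
    2 ^ k &&& (2 ^ j * (2 * t + 1) - 1) = if k < j then 2 ^ k else if k = j then 0 else 2 ^ k * (Nat.testBit (2 * t) (k - j)).toNat := by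
  rw [Nat.two_pow_and, pv_testBit_pred]
  rcases Nat.lt_or_ge k j with hk | hk
  · simp [hk]
  · rcases Nat.eq_or_lt_of_le hk with hkj | hkj
    · simp [hkj.symm, Nat.testBit_zero, Nat.mul_mod_right]
    · have : ¬ k < j := Nat.not_lt.mpr hk
      have : k ≠ j := by omega
      simp [Nat.not_lt.mpr hk, this]

-- Int-level: Python's flags & (1 << k) and flags & -flags for flags = ± 2^j*(2t+1)
lemma pv_band_lt_pos (j t k : Nat) (hk : k < j) :
    PySem.Int.band ((2 ^ j * (2 * t + 1) : Nat) : Int) ((2 ^ k : Nat) : Int) = 0 := by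
  rw [PySem.Int.band_natCast, pv_and_two_pow_lt j t k hk]; rfl

lemma pv_band_eq_pos (j t : Nat) :
    PySem.Int.band ((2 ^ j * (2 * t + 1) : Nat) : Int) ((2 ^ j : Nat) : Int) = ((2 ^ j : Nat) : Int) := by
  rw [PySem.Int.band_natCast, pv_and_two_pow_eq j t]

lemma pv_band_lt_neg (j t k : Nat) (hk : k < j) :
    PySem.Int.band (-((2 ^ j * (2 * t + 1) : Nat) : Int)) ((2 ^ k : Nat) : Int) = 0 := by
  have hm : 0 < 2 ^ j * (2 * t + 1) := by positivity
  have ha : ¬ (0 : Int) ≤ -((2 ^ j * (2 * t + 1) : Nat) : Int) := by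
    simp only [neg_nonneg]
    exact not_le.mpr (by exact_mod_cast hm)
  have hb : (0 : Int) ≤ ((2 ^ k : Nat) : Int) := by positivity
  simp only [PySem.Int.band, if_neg ha, if_pos hb]
  have hna : (-(-((2 ^ j * (2 * t + 1) : Nat) : Int)) - 1).toNat = 2 ^ j * (2 * t + 1) - 1 := by
    have hm' : 0 < 2 ^ j * (2 * t + 1) := by positivity
    generalize 2 ^ j * (2 * t + 1) = M at hm' ⊢
    simp only [neg_neg]
    omega
  rw [hna, Int.toNat_natCast, pv_pred_and_two_pow]
  simp [hk]

lemma pv_band_eq_neg (j t : Nat) :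
    PySem.Int.band (-((2 ^ j * (2 * t + 1) : Nat) : Int)) ((2 ^ j : Nat) : Int) = ((2 ^ j : Nat) : Int) := by
  have hm : 0 < 2 ^ j * (2 * t + 1) := by positivity
  have ha : ¬ (0 : Int) ≤ -((2 ^ j * (2 * t + 1) : Nat) : Int) := by
    simp only [neg_nonneg]
    exact not_le.mpr (by exact_mod_cast hm)
  have hb : (0 : Int) ≤ ((2 ^ j : Nat) : Int) := by positivity
  simp only [PySem.Int.band, if_neg ha, if_pos hb]
  have hna : (-(-((2 ^ j * (2 * t + 1) : Nat) : Int)) - 1).toNat = 2 ^ j * (2 * t + 1) - 1 := by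
    have hm' : 0 < 2 ^ j * (2 * t + 1) := by positivity
    generalize 2 ^ j * (2 * t + 1) = M at hm' ⊢
    simp only [neg_neg]
    omega
  rw [hna, Int.toNat_natCast, pv_pred_and_two_pow]
  simp

lemma pv_band_neg_self_pos (j t : Nat) :
    PySem.Int.band ((2 ^ j * (2 * t + 1) : Nat) : Int) (-((2 ^ j * (2 * t + 1) : Nat) : Int)) = ((2 ^ j : Nat) : Int) := by
  have hm : 0 < 2 ^ j * (2 * t + 1) := by positivity
  have ha : (0 : Int) ≤ ((2 ^ j * (2 * t + 1) : Nat) : Int) := by positivity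
  have hb : ¬ (0 : Int) ≤ -((2 ^ j * (2 * t + 1) : Nat) : Int) := by
    simp only [neg_nonneg]
    exact not_le.mpr (by exact_mod_cast hm)
  simp only [PySem.Int.band, if_pos ha, if_neg hb]
  have hna : (-(-((2 ^ j * (2 * t + 1) : Nat) : Int)) - 1).toNat = 2 ^ j * (2 * t + 1) - 1 := by
    have hm' : 0 < 2 ^ j * (2 * t + 1) := by positivity
    generalize 2 ^ j * (2 * t + 1) = M at hm' ⊢
    simp only [neg_neg]
    omega
  rw [hna, Int.toNat_natCast, pv_and_pred]
  have : 2 ^ j * (2 * t + 1) - 2 ^ j * (2 * t) = 2 ^ j := by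
    rw [show 2 ^ j * (2 * t + 1) = 2 ^ j * (2 * t) + 2 ^ j from by ring]
    exact Nat.add_sub_cancel_left _ _
  rw [this]

lemma pv_band_neg_self_neg (j t : Nat) :
    PySem.Int.band (-((2 ^ j * (2 * t + 1) : Nat) : Int)) (-(-((2 ^ j * (2 * t + 1) : Nat) : Int))) = ((2 ^ j : Nat) : Int) := by
  rw [neg_neg, PySem.Int.band_comm]
  exact pv_band_neg_self_pos j t

-- Python's (2^j).bit_length() = j + 1
lemma pv_bitLength_two_pow (j : Nat) :
    PySem.Int.bitLength ((2 ^ j : Nat) : Int) = j + 1 := by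
  induction j with
  | zero => decide
  | succ j ih =>
      rw [PySem.Int.bitLength_natCast (m := 2 ^ (j + 1)) (by positivity)]
      have : 2 ^ (j + 1) / 2 = 2 ^ j := by
        rw [pow_succ]
        omega
      rw [this, ih]

-- A's loop over a block of keys 2^k with every k below the lowest set bit: falls through
lemma pv_loop_below (flags : Int) (j : Nat)
    (hlt : ∀ k, k < j → PySem.Int.band flags ((2 ^ k : Nat) : Int) = 0)
    (ks : List Nat) (hks : ∀ k ∈ ks, k < j) (nf : Nat → String) :
    flagLoopA flags (ks.map fun k => (((2 ^ k : Nat) : Int), nf k)) = "green" := by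
  induction ks with
  | nil => rfl
  | cons k ks ih =>
      simp only [List.map_cons, flagLoopA]
      rw [if_neg (by simpa using hlt k (hks k (by simp)))]
      exact ih (fun k' hk' => hks k' (by simp [hk']))

-- A's loop: keys below j fall through, key 2^j fires
lemma pv_loop_split (flags : Int) (j : Nat)
    (hlt : ∀ k, k < j → PySem.Int.band flags ((2 ^ k : Nat) : Int) = 0)
    (heq : PySem.Int.band flags ((2 ^ j : Nat) : Int) ≠ 0)
    (ks1 ks2 : List Nat) (hks1 : ∀ k ∈ ks1, k < j) (nf : Nat → String) :
    flagLoopA flags ((ks1 ++ j :: ks2).map fun k => (((2 ^ k : Nat) : Int), nf k)) = nf j := by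
  induction ks1 with
  | nil => simp only [List.nil_append, List.map_cons, flagLoopA]; rw [if_pos heq]
  | cons k ks1 ih =>
      simp only [List.cons_append, List.map_cons, flagLoopA]
      rw [if_neg (by simpa using hlt k (hks1 k (by simp)))]
      exact ih (fun k' hk' => hks1 k' (by simp [hk']))

-- the literal dict's items are the 21 keys 2^k paired with flagNames
lemma pv_items_eq :
    (PySem.Dict.ofList
      ([(0x00000001, "checkered"), (0x00000002, "white"), (0x00000004, "green"),
        (0x00000008, "yellow"), (0x00000010, "red"), (0x00000020, "blue"),
        (0x00000040, "debris"), (0x00000080, "crossed"), (0x00000100, "yellow_waving"),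
        (0x00000200, "one_lap_to_green"), (0x00000400, "green_held"),
        (0x00000800, "ten_to_go"), (0x00001000, "five_to_go"),
        (0x00002000, "random_waving"), (0x00004000, "caution"),
        (0x00008000, "caution_waving"), (0x00010000, "black"),
        (0x00020000, "disqualify"), (0x00040000, "repair"), (0x00080000, "furled"),
        (0x00100000, "end_of_session")] : List (Int × String))).items =
      (List.range 21).map fun k => (((2 ^ k : Nat) : Int), flagNames.getD k "green") := by
  decide

-- A's loop over the whole map returns the name at the lowest set bit (or green if it is above bit 20)
lemma pv_loopA_value (flags : Int) (j : Nat)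
    (hlt : ∀ k, k < j → PySem.Int.band flags ((2 ^ k : Nat) : Int) = 0)
    (heq : PySem.Int.band flags ((2 ^ j : Nat) : Int) ≠ 0) :
    flagLoopA flags ((List.range 21).map fun k => (((2 ^ k : Nat) : Int), flagNames.getD k "green")) =
      if j < 21 then flagNames.getD j "green" else "green" := by
  rcases Nat.lt_or_ge j 21 with hj | hj
  · rw [if_pos hj]
    have hsplit : List.range 21 = List.range j ++ j :: ((List.range (20 - j)).map Nat.succ).map (j + ·) := by
      rw [show 21 = j + (21 - j) by omega, List.range_add,
        show 21 - j = (20 - j) + 1 by omega, List.range_succ_eq_map]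
      simp
    rw [hsplit]
    exact pv_loop_split flags j hlt heq _ _ (fun k hk => List.mem_range.mp hk) _
  · rw [if_neg (by omega)]
    exact pv_loop_below flags j hlt (List.range 21) (fun k hk => by have := List.mem_range.mp hk; omega) _

-- B returns the same indexed name
lemma pv_altB_value (flags : Int) (j : Nat) (hf : flags ≠ 0)
    (hlsb : PySem.Int.band flags (-flags) = ((2 ^ j : Nat) : Int)) :
    get_flag_string_py_alt flags = if j < 21 then flagNames.getD j "green" else "green" := by
  unfold get_flag_string_py_alt
  rw [if_neg hf, hlsb, pv_bitLength_two_pow]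
  have hlen : (flagNames.length : Int) = 21 := by decide
  have hi : ((j + 1 : Nat) : Int) - 1 = (j : Int) := by push_cast; ring
  rw [hlen, hi]
  rcases Nat.lt_or_ge j 21 with hj | hj
  · rw [if_pos (by exact_mod_cast hj), if_pos hj]
    rw [PySem.List.pyGet?_natCast]
    have hj' : j < flagNames.length := by simpa using hj
    simp [List.getElem?_eq_getElem hj', List.getD_eq_getElem?_getD]
  · rw [if_neg (by exact_mod_cast (Nat.not_lt.mpr hj)), if_neg (Nat.not_lt.mpr hj)]

-- the core equivalence for nonzero flags
lemma pv_core (flags : Int) (hf : flags ≠ 0) :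
    get_flag_string_py flags = get_flag_string_py_alt flags := by
  have hm0 : flags.natAbs ≠ 0 := by
    intro h; exact hf (Int.natAbs_eq_zero.mp h)
  obtain ⟨j, w, hodd, hw⟩ := Nat.exists_eq_two_pow_mul_odd hm0
  obtain ⟨t, ht⟩ := hodd
  have hm : flags.natAbs = 2 ^ j * (2 * t + 1) := by rw [hw, ht]
  -- the three bit facts, by sign of flags
  have hfacts : (∀ k, k < j → PySem.Int.band flags ((2 ^ k : Nat) : Int) = 0) ∧
      PySem.Int.band flags ((2 ^ j : Nat) : Int) ≠ 0 ∧
      PySem.Int.band flags (-flags) = ((2 ^ j : Nat) : Int) := by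
    have hpow : (0 : Int) < ((2 ^ j : Nat) : Int) := by positivity
    rcases Int.natAbs_eq flags with hpos | hneg
    · rw [hpos, hm]
      exact ⟨fun k hk => pv_band_lt_pos j t k hk,
        by rw [pv_band_eq_pos j t]; exact ne_of_gt hpow,
        pv_band_neg_self_pos j t⟩
    · rw [hneg, hm]
      exact ⟨fun k hk => pv_band_lt_neg j t k hk,
        by rw [pv_band_eq_neg j t]; exact ne_of_gt hpow,
        pv_band_neg_self_neg j t⟩
  obtain ⟨hlt, heq, hlsb⟩ := hfacts
  unfold get_flag_string_py
  rw [if_neg hf]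
  simp only [pv_items_eq]
  rw [pv_loopA_value flags j hlt heq, pv_altB_value flags j hf hlsb]

-- ===== VERDICT (by name: the statement is the Claim_ definition above) =====
theorem get_flag_string_py_spec : Claim_equal_get_flag_string_py := by
  intro flags _
  unfold Spec_get_flag_string_py
  by_cases hf : flags = 0
  · subst hf; rfl
  · exact pv_core flags hf
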